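-- pv_equiv track=rewrite | github.com/UCSB-VRL/bisqueUCSB | bqserver/bq/stats/controllers/stats_server.py | getNumberedArgs
-- ===== SOURCE A (Python) =====
-- def getNumberedArgs(d, basename):
--     if basename not in d:
--         return []
--     l = [d[basename]]
--     i = 1
--     while '%s%s'%(basename, i) in d:
--         l.append(d['%s%s'%(basename, i)])
--         i += 1
--     return l
-- ===== SOURCE B (Python) =====
-- def getNumberedArgs(d, basename):
--     # Inverse strategy: instead of probing generated keys basename, basename1, ...
--     # against the dict, scan the dict's items once, parse each key's numeric
--     # suffix into an index, sort by index, and keep the consecutive run 0,1,2,...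
--     def parse_index(k):
--         # index i such that k == basename + ('' if i == 0 else str(i)), else None
--         if not k.startswith(basename):
--             return None
--         rest = k[len(basename):]
--         if rest == '':
--             return 0
--         if rest.isdigit() and rest[0] != '0':
--             n = 0
--             for ch in rest:
--                 n = 10 * n + (ord(ch) - 48)
--             return n
--         return None
--     indexed = []
--     for k, v in d.items():
--         i = parse_index(k)
--         if i is not None:
--             indexed.append((i, v))
--     indexed.sort(key=lambda t: t[0])
--     out = []
--     for pos, (i, v) in enumerate(indexed):
--         if i != pos:
--             break
--         out.append(v)
--     return out
-- ===== Notes on version B (the rewrite author's own statement) =====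
-- stated objective: alternative
-- what changed: A probes generated keys basename, basename1, basename2, ... against the dict until one is missing; B inverts the direction: it scans the dict's items once, parses each key's numeric suffix into an index, sorts the (index, value) pairs, and keeps the consecutive run of indices 0,1,2,...
import Mathlib
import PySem

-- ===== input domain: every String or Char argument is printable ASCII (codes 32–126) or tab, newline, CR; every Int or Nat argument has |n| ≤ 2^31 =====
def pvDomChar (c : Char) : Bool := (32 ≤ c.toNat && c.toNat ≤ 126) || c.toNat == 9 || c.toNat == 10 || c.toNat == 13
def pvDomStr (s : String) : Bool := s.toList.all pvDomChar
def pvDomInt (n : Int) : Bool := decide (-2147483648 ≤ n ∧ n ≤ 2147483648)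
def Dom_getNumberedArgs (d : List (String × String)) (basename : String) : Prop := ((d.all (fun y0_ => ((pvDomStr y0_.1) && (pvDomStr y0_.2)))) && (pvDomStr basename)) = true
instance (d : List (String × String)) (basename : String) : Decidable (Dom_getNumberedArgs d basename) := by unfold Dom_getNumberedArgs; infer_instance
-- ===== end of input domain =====

-- B inverts A's traversal: instead of probing generated keys basename, basename1, ... against
-- the dict, it scans the dict's items once, parses each key's numeric suffix into an index,
-- sorts by index, and keeps the consecutive run 0, 1, 2, ... (alternative algorithm, same task).

-- ===== PORT A =====
-- A's while loop; fuel d.length is enough: the probed keys basename1, basename2, ... are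
-- pairwise distinct, so with distinct dict keys the Python loop runs at most d.length times.
def loopA (dd : PySem.Dict String String) (basename : String) : Nat → Nat → List String
  | 0, _ => []
  | fuel + 1, i =>
    if dd.contains (basename ++ PySem.Int.toStr (i : Int)) then
      dd.getD (basename ++ PySem.Int.toStr (i : Int)) "" :: loopA dd basename fuel (i + 1)
    else []

def getNumberedArgs (d : List (String × String)) (basename : String) : List String :=
  let dd := PySem.Dict.mk d
  if dd.contains basename then dd.getD basename "" :: loopA dd basename d.length 1 else []

-- ===== PORT B =====
-- Source B's manual decimal fold: n = 10*n + (ord(ch) - 48)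
def parseVal (cs : List Char) : Int :=
  cs.foldl (fun a c => 10 * a + ((c.toNat : Int) - 48)) 0

-- Source B's parse_index(k): the index i with k == basename + ('' if i == 0 else str(i)), else None
def parseIndex? (basename : String) (k : String) : Option Int :=
  if PySem.Str.startswith k basename then
    let rest := PySem.Str.slice k (some (PySem.Str.len basename)) none
    if rest == "" then some 0
    else if PySem.Str.strIsdigit rest && !(PySem.Str.pyGet? rest 0 == some '0') then
      some (parseVal rest.toList)
    else none
  else none

-- the items loop of Source B building `indexed`
def collectIndexed (d : List (String × String)) (basename : String) : List (Int × String) :=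
  d.foldl (fun acc kv =>
    match parseIndex? basename kv.1 with
    | some i => acc ++ [(i, kv.2)]
    | none => acc) []

-- the enumerate loop of Source B with its break
def takeRun : Nat → List (Int × String) → List String
  | _, [] => []
  | pos, (i, v) :: t => if i == (pos : Int) then v :: takeRun (pos + 1) t else []

def getNumberedArgs_alt (d : List (String × String)) (basename : String) : List String :=
  takeRun 0 (PySem.List.sorted (collectIndexed d basename) (fun t => t.1) false)

-- ===== PRECONDITION & SPEC =====
-- Pre_ excludes association lists with duplicate keys: the d argument is a Python dict, whose
-- keys are necessarily distinct, so such lists represent no dict input; on them the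
-- first-match lookup order of the list encoding is accidental.
def Pre_getNumberedArgs (d : List (String × String)) (basename : String) : Prop :=
  (d.map Prod.fst).Nodup
instance (d : List (String × String)) (basename : String) : Decidable (Pre_getNumberedArgs d basename) := by unfold Pre_getNumberedArgs; infer_instance

def pvWitness_getNumberedArgs : (List (String × String)) × String :=
  ([("a", "x"), ("a1", "y"), ("b", "z")], "a")

def Spec_getNumberedArgs (d : List (String × String)) (basename : String) (out : List String) : Prop := out = getNumberedArgs_alt d basename
instance (d : List (String × String)) (basename : String) (out : List String) : Decidable (Spec_getNumberedArgs d basename out) := by unfold Spec_getNumberedArgs; infer_instance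

-- ===== CLAIM (what is proved, stated in full; the proofs are below) =====
def Claim_equal_getNumberedArgs : Prop := ∀ (d : List (String × String)) (basename : String), Dom_getNumberedArgs d basename → Pre_getNumberedArgs d basename → Spec_getNumberedArgs d basename (getNumberedArgs d basename)

-- ===== LEMMAS AND PROOFS =====

-- the i-th key A probes: basename for i = 0, basename ++ str(i) for i ≥ 1
def keyN (basename : String) (i : Nat) : String :=
  if i = 0 then basename else basename ++ PySem.Int.toStr (i : Int)

-- canonical decimal digits of n (the value of Nat.toDigits 10 n)
def canon (n : Nat) : List Char :=
  if h : n < 10 then [Nat.digitChar n]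
  else canon (n / 10) ++ [Nat.digitChar (n % 10)]
  decreasing_by exact Nat.div_lt_self (by omega) (by omega)

-- Nat-valued decimal fold
def valN (cs : List Char) : Nat :=
  cs.foldl (fun a c => 10 * a + (c.toNat - 48)) 0

-- the per-item contribution of Source B's items loop (collectIndexed as a flatMap)
def gIdx (basename : String) (kv : String × String) : List (Int × String) :=
  match parseIndex? basename kv.1 with
  | some i => [(i, kv.2)]
  | none => []



lemma digitChar_toNat (k : Nat) (h : k < 10) : (Nat.digitChar k).toNat = 48 + k := by
  interval_cases k <;> rfl

lemma toDigitsCore_canon : ∀ (f n : Nat) (acc : List Char), n < 10 ^ (f + 1) →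
    Nat.toDigitsCore 10 (f + 1) n acc = canon n ++ acc := by
  intro f
  induction f with
  | zero =>
    intro n acc h
    have h10 : n < 10 := by simpa using h
    unfold Nat.toDigitsCore
    rw [if_pos (by omega : n / 10 = 0)]
    rw [canon, dif_pos h10]
    simp [Nat.mod_eq_of_lt h10]
  | succ f ih =>
    intro n acc h
    by_cases h10 : n < 10
    · unfold Nat.toDigitsCore
      rw [if_pos (by omega : n / 10 = 0)]
      rw [canon, dif_pos h10]
      simp [Nat.mod_eq_of_lt h10]
    · unfold Nat.toDigitsCore
      rw [if_neg (by omega : ¬ n / 10 = 0)]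
      rw [ih (n / 10) _ (by
        rw [Nat.div_lt_iff_lt_mul (by omega)]
        calc n < 10 ^ (f + 1 + 1) := h
        _ = 10 ^ (f + 1) * 10 := by ring)]
      conv_rhs => rw [canon]
      rw [dif_neg h10]
      simp
lemma toChars_natCast (i : Nat) : PySem.Int.toChars (i : Int) = canon i := by
  show PySem.Int.toChars (i : Int) = canon i
  unfold PySem.Int.toChars
  rw [if_neg (by omega : ¬ (i : Int) < 0)]
  show Nat.toDigits 10 (Int.toNat i) = canon i
  simp only [Int.toNat_natCast]
  show Nat.toDigitsCore 10 (i + 1) i [] = canon i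
  rw [toDigitsCore_canon i i [] (by
    calc i < 10 ^ i := Nat.lt_pow_self (by omega)
    _ ≤ 10 ^ (i + 1) := Nat.pow_le_pow_right (by omega) (by omega))]
  simp

lemma canon_digits : ∀ n, ∀ c ∈ canon n, 48 ≤ c.toNat ∧ c.toNat ≤ 57 := by
  intro n
  induction n using Nat.strong_induction_on with
  | _ n ih =>
    intro c hc
    by_cases h10 : n < 10
    · rw [canon, dif_pos h10] at hc
      simp at hc
      subst hc
      rw [digitChar_toNat n h10]; omega
    · rw [canon, dif_neg h10] at hc
      simp at hc
      rcases hc with hc | hc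
      · exact ih (n / 10) (Nat.div_lt_self (by omega) (by omega)) c hc
      · subst hc
        rw [digitChar_toNat _ (Nat.mod_lt _ (by omega))]
        have := Nat.mod_lt n (y := 10) (by omega)
        omega

lemma canon_ne_nil (n : Nat) : canon n ≠ [] := by
  by_cases h10 : n < 10
  · rw [canon, dif_pos h10]; simp
  · rw [canon, dif_neg h10]; simp

lemma canon_head_pos : ∀ n, 1 ≤ n → ∀ c, (canon n).head? = some c → c ≠ '0' := by
  intro n
  induction n using Nat.strong_induction_on with
  | _ n ih =>
    intro hn c hc
    by_cases h10 : n < 10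
    · rw [canon, dif_pos h10] at hc
      simp at hc
      subst hc
      intro he
      have := digitChar_toNat n h10
      rw [he] at this
      simp at this
      omega
    · rw [canon, dif_neg h10] at hc
      rw [List.head?_append_of_ne_nil _ (canon_ne_nil _)] at hc
      exact ih (n / 10) (Nat.div_lt_self (by omega) (by omega))
        ((Nat.one_le_div_iff (by omega)).mpr (by omega)) c hc

lemma valN_append_singleton (t : List Char) (c : Char) :
    valN (t ++ [c]) = 10 * valN t + (c.toNat - 48) := by
  simp [valN, List.foldl_append]

lemma valN_canon : ∀ n, valN (canon n) = n := by
  intro n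
  induction n using Nat.strong_induction_on with
  | _ n ih =>
    by_cases h10 : n < 10
    · rw [canon, dif_pos h10]
      simp [valN, digitChar_toNat n h10]
    · rw [canon, dif_neg h10, valN_append_singleton,
        ih (n / 10) (Nat.div_lt_self (by omega) (by omega)),
        digitChar_toNat _ (Nat.mod_lt _ (by omega))]
      omega


lemma valfold_ge (t : List Char) : ∀ a : Nat, a ≤ t.foldl (fun a c => 10 * a + (c.toNat - 48)) a := by
  induction t with
  | nil => intro a; simp
  | cons c t ih =>
    intro a
    simp only [List.foldl_cons]
    calc a ≤ 10 * a + (c.toNat - 48) := by omega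
    _ ≤ _ := ih _

lemma valN_pos (c : Char) (t : List Char) (h48 : 48 ≤ c.toNat) (h0 : c ≠ '0') :
    1 ≤ valN (c :: t) := by
  have : c.toNat ≠ 48 := by
    intro he
    apply h0
    apply Char.ext (UInt32.toNat_inj.mp ?_)
    show c.toNat = ('0' : Char).toNat
    rw [he]; decide
  calc 1 ≤ c.toNat - 48 := by omega
  _ ≤ _ := by
    have := valfold_ge t (c.toNat - 48)
    simp only [valN, List.foldl_cons]
    simpa using this

lemma valN_pos' (s : List Char) (hne : s ≠ []) (hdig : ∀ c ∈ s, 48 ≤ c.toNat ∧ c.toNat ≤ 57)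
    (hhd : ∀ c, s.head? = some c → c ≠ '0') : 1 ≤ valN s := by
  cases s with
  | nil => exact absurd rfl hne
  | cons c t =>
    exact valN_pos c t (hdig c (by simp)).1 (hhd c (by simp))

lemma canon_valN : ∀ (s : List Char), s ≠ [] → (∀ c ∈ s, 48 ≤ c.toNat ∧ c.toNat ≤ 57) →
    (∀ c, s.head? = some c → c ≠ '0') → canon (valN s) = s := by
  intro s
  induction s using List.reverseRecOn with
  | nil => intro h; exact absurd rfl h
  | append_singleton t c ih =>
    intro _ hdig hhd
    rcases List.eq_nil_or_concat' t with rfl | ⟨t', c', rfl⟩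
    · -- single char
      simp only [List.nil_append] at hdig hhd ⊢
      have hd := hdig c (by simp)
      have hc0 : c ≠ '0' := hhd c (by simp)
      have hne : c.toNat ≠ 48 := by
        intro he; apply hc0; apply Char.ext (UInt32.toNat_inj.mp ?_); show c.toNat = ('0' : Char).toNat; rw [he]; decide
      have hv : valN [c] = c.toNat - 48 := by simp [valN]
      rw [hv, canon, dif_pos (by omega)]
      have : Nat.digitChar (c.toNat - 48) = c := by
        apply Char.ext (UInt32.toNat_inj.mp ?_)
        have h10 : c.toNat - 48 < 10 := by omega
        have := digitChar_toNat _ h10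
        show (Nat.digitChar (c.toNat - 48)).toNat = c.toNat
        omega
      rw [this]
    · -- t = t' ++ [c'] nonempty
      have hdig' : ∀ x ∈ t' ++ [c'], 48 ≤ x.toNat ∧ x.toNat ≤ 57 := by
        intro x hx; exact hdig x (by simp at hx ⊢; tauto)
      have hhd' : ∀ x, (t' ++ [c']).head? = some x → x ≠ '0' := by
        intro x hx
        apply hhd
        rw [List.head?_append_of_ne_nil _ (by simp : (t' ++ [c'] : List Char) ≠ [])]
        exact hx
      have hrec := ih (by simp) hdig' hhd'
      have hdc := hdig c (by simp)
      have hpos : 1 ≤ valN (t' ++ [c']) := valN_pos' _ (by simp) hdig' hhd'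
      rw [valN_append_singleton]
      have hge : ¬ 10 * valN (t' ++ [c']) + (c.toNat - 48) < 10 := by omega
      rw [canon, dif_neg hge]
      have hdiv : (10 * valN (t' ++ [c']) + (c.toNat - 48)) / 10 = valN (t' ++ [c']) := by omega
      have hmod : (10 * valN (t' ++ [c']) + (c.toNat - 48)) % 10 = c.toNat - 48 := by omega
      rw [hdiv, hmod, hrec]
      have : Nat.digitChar (c.toNat - 48) = c := by
        apply Char.ext (UInt32.toNat_inj.mp ?_)
        have h10 : c.toNat - 48 < 10 := by omega
        have := digitChar_toNat _ h10
        show (Nat.digitChar (c.toNat - 48)).toNat = c.toNat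
        omega
      rw [this]



lemma parseVal_eq_valN (s : List Char) (hdig : ∀ c ∈ s, 48 ≤ c.toNat) :
    parseVal s = (valN s : Int) := by
  unfold parseVal valN
  suffices h : ∀ a : Nat, s.foldl (fun a c => 10 * a + ((c.toNat : Int) - 48)) (a : Int)
      = ((s.foldl (fun a c => 10 * a + (c.toNat - 48)) a : Nat) : Int) by
    simpa using h 0
  induction s with
  | nil => intro a; simp
  | cons c t ih =>
    intro a
    simp only [List.foldl_cons]
    have h48 := hdig c (by simp)
    have : (10 * (a : Int) + ((c.toNat : Int) - 48)) = ((10 * a + (c.toNat - 48) : Nat) : Int) := by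
      push_cast [h48]
      omega
    rw [this]
    exact ih (fun c hc => hdig c (by simp [hc])) _

lemma pyGet0_head (r : String) : PySem.Str.pyGet? r 0 = r.toList.head? := by
  rw [show (0:Int) = ((0:Nat):Int) from rfl, PySem.Str.pyGet?_natCast]
  exact List.head?_eq_getElem?.symm

lemma rest_toList (basename k : String) (h : PySem.Str.startswith k basename = true) :
    (PySem.Str.slice k (some (PySem.Str.len basename)) none).toList
      = k.toList.drop basename.toList.length ∧
    k.toList = basename.toList ++ k.toList.drop basename.toList.length := by
  have hpre : basename.toList <+: k.toList := by
    rw [PySem.Str.startswith_eq] at h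
    exact (PySem.Chars.startswith_iff _ _).mp h
  constructor
  · rw [PySem.Str.toList_slice, PySem.Chars.slice_eq_listSlice, PySem.Str.len_eq,
      PySem.List.slice_from _ (by positivity)]
    simp
  · rcases hpre with ⟨t, ht⟩
    conv_lhs => rw [← ht]
    rw [← ht, List.drop_left]

lemma isdigit_iff (c : Char) : PySem.Chars.isdigit c = true ↔ 48 ≤ c.toNat ∧ c.toNat ≤ 57 := by
  simp [PySem.Chars.isdigit, Char.le_def, UInt32.le_iff_toNat_le]

lemma keyN_toList (basename : String) (i : Nat) (hi : 1 ≤ i) :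
    (keyN basename i).toList = basename.toList ++ canon i := by
  rw [keyN, if_neg (by omega), String.toList_append, PySem.Int.toList_toStr, toChars_natCast]

lemma parseIndex?_keyN (basename : String) (i : Nat) :
    parseIndex? basename (keyN basename i) = some (i : Int) := by
  rcases Nat.eq_zero_or_pos i with rfl | hi
  · have hk : keyN basename 0 = basename := by rw [keyN, if_pos rfl]
    rw [hk]
    unfold parseIndex?
    have hsw : PySem.Str.startswith basename basename = true := by
      rw [PySem.Str.startswith_eq]
      exact (PySem.Chars.startswith_iff _ _).mpr (List.prefix_refl _)
    rw [if_pos hsw]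
    have hr := (rest_toList basename basename hsw).1
    simp only [List.drop_length] at hr
    have : PySem.Str.slice basename (some (PySem.Str.len basename)) none = "" :=
      String.toList_inj.mp (by simpa using hr)
    rw [this]
    simp
  · have hk := keyN_toList basename i hi
    unfold parseIndex?
    have hsw : PySem.Str.startswith (keyN basename i) basename = true := by
      rw [PySem.Str.startswith_eq]
      exact (PySem.Chars.startswith_iff _ _).mpr ⟨canon i, hk.symm⟩
    rw [if_pos hsw]
    have hr := (rest_toList basename (keyN basename i) hsw).1
    rw [hk, List.drop_left] at hr
    set rest := PySem.Str.slice (keyN basename i) (some (PySem.Str.len basename)) none with hrest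
    have hne : ¬ rest = "" := by
      intro he
      rw [he] at hr
      exact canon_ne_nil i hr.symm
    rw [if_neg (by simpa using hne)]
    have hdig : PySem.Str.strIsdigit rest = true := by
      unfold PySem.Str.strIsdigit PySem.Chars.strIsdigit
      rw [hr]
      simp only [Bool.and_eq_true, List.all_eq_true]
      constructor
      · simpa [List.isEmpty_iff] using canon_ne_nil i
      · intro c hc
        exact (isdigit_iff c).mpr (canon_digits i c hc)
    have hhd : ¬ (PySem.Str.pyGet? rest 0 == some '0') = true := by
      rw [pyGet0_head, hr]
      simp only [beq_iff_eq]
      intro he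
      exact canon_head_pos i hi '0' he rfl
    have hcond : (PySem.Str.strIsdigit rest && !PySem.Str.pyGet? rest 0 == some '0') = true := by
      simp only [Bool.and_eq_true, Bool.not_eq_true', beq_eq_false_iff_ne, ne_eq]
      exact ⟨hdig, by simpa using hhd⟩
    rw [if_pos hcond]
    simp only [Option.some.injEq]
    rw [show rest.toList = canon i from hr,
      parseVal_eq_valN _ (fun c hc => (canon_digits i c hc).1), valN_canon]

lemma parseIndex?_some (basename k : String) (j : Int)
    (h : parseIndex? basename k = some j) : ∃ i : Nat, j = (i : Int) ∧ k = keyN basename i := by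
  unfold parseIndex? at h
  by_cases hsw : PySem.Str.startswith k basename = true
  · rw [if_pos hsw] at h
    have hr := rest_toList basename k hsw
    set rest := PySem.Str.slice k (some (PySem.Str.len basename)) none with hrest
    by_cases he : (rest == "") = true
    · rw [if_pos he] at h
      refine ⟨0, by simpa using h.symm, ?_⟩
      rw [keyN, if_pos rfl]
      apply String.toList_inj.mp
      have : rest = "" := by simpa using he
      rw [hr.2, ← hr.1, this]
      simp
    · rw [if_neg he] at h
      by_cases hc : (PySem.Str.strIsdigit rest && !(PySem.Str.pyGet? rest 0 == some '0')) = true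
      · rw [if_pos hc] at h
        simp only [Bool.and_eq_true, Bool.not_eq_true', beq_eq_false_iff_ne, ne_eq] at hc
        obtain ⟨hdig, hhd⟩ := hc
        unfold PySem.Str.strIsdigit PySem.Chars.strIsdigit at hdig
        simp only [Bool.and_eq_true, List.all_eq_true, Bool.not_eq_true', List.isEmpty_eq_false_iff]  at hdig
        obtain ⟨hne, hall⟩ := hdig
        have hall' : ∀ c ∈ rest.toList, 48 ≤ c.toNat ∧ c.toNat ≤ 57 :=
          fun c hc => (isdigit_iff c).mp (hall c hc)
        have hhd' : ∀ c, rest.toList.head? = some c → c ≠ '0' := by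
          intro c hcc
          intro h0
          apply hhd
          rw [pyGet0_head, hcc, h0]
        refine ⟨valN rest.toList, ?_, ?_⟩
        · have := Option.some.inj h
          rw [← this, parseVal_eq_valN _ (fun c hc => (hall' c hc).1)]
        · have hpos : 1 ≤ valN rest.toList := valN_pos' _ hne hall' hhd'
          apply String.toList_inj.mp
          rw [keyN_toList basename _ hpos, canon_valN _ hne hall' hhd']
          rw [hr.2, ← hr.1]
      · rw [if_neg hc] at h; exact absurd h (by simp)
  · rw [if_neg hsw] at h; exact absurd h (by simp)

lemma keyN_inj (basename : String) : Function.Injective (keyN basename) := by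
  intro i j h
  have h1 := parseIndex?_keyN basename i
  have h2 := parseIndex?_keyN basename j
  rw [h] at h1
  rw [h2] at h1
  exact_mod_cast (Option.some.inj h1).symm






-- collectIndexed is a flatMap

lemma collectIndexed_eq (d : List (String × String)) (basename : String) :
    collectIndexed d basename = d.flatMap (gIdx basename) := by
  unfold collectIndexed
  have : (fun (acc : List (Int × String)) kv =>
      match parseIndex? basename kv.1 with
      | some i => acc ++ [(i, kv.2)]
      | none => acc) = fun acc kv => acc ++ gIdx basename kv := by
    funext acc kv
    unfold gIdx
    cases parseIndex? basename kv.1 <;> simp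
  rw [this, PySem.List.foldl_append_eq_flatMap]
  simp

lemma mem_collect (d : List (String × String)) (basename : String) (j : Int) (v : String) :
    (j, v) ∈ collectIndexed d basename ↔
      ∃ i : Nat, j = (i : Int) ∧ (keyN basename i, v) ∈ d := by
  rw [collectIndexed_eq, List.mem_flatMap]
  constructor
  · rintro ⟨kv, hkv, hmem⟩
    unfold gIdx at hmem
    cases hp : parseIndex? basename kv.1 with
    | none => rw [hp] at hmem; simp at hmem
    | some i0 =>
      rw [hp] at hmem
      simp at hmem
      obtain ⟨hj, hv⟩ := hmem
      obtain ⟨i, hi, hk⟩ := parseIndex?_some basename kv.1 i0 hp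
      refine ⟨i, by rw [hj, hi], by rw [← hk, hv]; simpa using hkv⟩
  · rintro ⟨i, hj, hmem⟩
    refine ⟨(keyN basename i, v), hmem, ?_⟩
    unfold gIdx
    rw [parseIndex?_keyN]
    simp [hj]

lemma nodup_collect_fst (d : List (String × String)) (basename : String)
    (hnd : (d.map Prod.fst).Nodup) : ((collectIndexed d basename).map Prod.fst).Nodup := by
  rw [collectIndexed_eq]
  induction d with
  | nil => simp
  | cons kv t ih =>
    simp only [List.map_cons, List.nodup_cons] at hnd
    rw [List.flatMap_cons, List.map_append]
    have ht := ih hnd.2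
    cases hp : parseIndex? basename kv.1 with
    | none =>
      simp only [gIdx, hp]
      simpa using ht
    | some i0 =>
      simp only [gIdx, hp]
      refine List.Nodup.append (by simp) ht ?_
      intro x hx hx'
      simp at hx
      subst hx
      obtain ⟨p, hp2, hfst⟩ := List.mem_map.mp hx'
      obtain ⟨i, hi, hmem⟩ := (mem_collect t basename p.1 p.2).mp
        (by rw [collectIndexed_eq]; simpa using hp2)
      obtain ⟨i', hi', hk'⟩ := parseIndex?_some basename kv.1 x hp
      have : i' = i := by
        have : (i : Int) = (i' : Int) := by rw [← hi, hfst, hi']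
        exact_mod_cast this.symm
      apply hnd.1
      rw [hk', this]
      exact List.mem_map.mpr ⟨(keyN basename i, p.2), hmem, rfl⟩

-- keyN i for i ≥ 1 is the key loopA probes
lemma keyN_succ (basename : String) (i : Nat) (hi : 1 ≤ i) :
    keyN basename i = basename ++ PySem.Int.toStr (i : Int) := by
  rw [keyN, if_neg (by omega)]

-- pigeonhole: if the first n numbered keys are all present, n ≤ d.length
lemma le_length_of_all_present (d : List (String × String)) (basename : String) (n : Nat)
    (h : ∀ i < n, (PySem.Dict.mk d).contains (keyN basename i) = true) : n ≤ d.length := by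
  classical
  have hsub : ((List.range n).map (keyN basename)) ⊆ d.map Prod.fst := by
    intro k hk
    obtain ⟨i, hi, rfl⟩ := List.mem_map.mp hk
    have := h i (List.mem_range.mp hi)
    rw [PySem.Dict.contains_eq_decide_mem_keys] at this
    simpa [PySem.Dict.keys] using of_decide_eq_true this
  have hnd : ((List.range n).map (keyN basename)).Nodup :=
    (List.nodup_range).map (keyN_inj basename)
  have hle : ((List.range n).map (keyN basename)).length ≤ (d.map Prod.fst).length := by
    calc ((List.range n).map (keyN basename)).length
        = ((List.range n).map (keyN basename)).toFinset.card :=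
          (List.toFinset_card_of_nodup hnd).symm
    _ ≤ (d.map Prod.fst).toFinset.card := Finset.card_le_card (by
        intro x hx
        simp only [List.mem_toFinset] at hx ⊢
        exact hsub hx)
    _ ≤ (d.map Prod.fst).length := (d.map Prod.fst).toFinset_card_le
  simpa using hle

lemma loopA_run (d : List (String × String)) (basename : String) (m : Nat)
    (hm : (PySem.Dict.mk d).contains (keyN basename m) = false)
    (hlt : ∀ i < m, (PySem.Dict.mk d).contains (keyN basename i) = true) :
    ∀ (fuel i : Nat), 1 ≤ i → i ≤ m → m ≤ i + fuel →
      loopA (PySem.Dict.mk d) basename fuel i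
        = (List.range' i (m - i)).map (fun j => (PySem.Dict.mk d).getD (keyN basename j) "") := by
  intro fuel
  induction fuel with
  | zero =>
    intro i h1 h2 h3
    have : m = i := by omega
    subst this
    simp [loopA]
  | succ fuel ih =>
    intro i h1 h2 h3
    rcases Nat.lt_or_ge i m with hlt' | hge
    · have hc := hlt i hlt'
      rw [keyN_succ basename i h1] at hc
      unfold loopA
      rw [if_pos hc, ih (i + 1) (by omega) (by omega) (by omega)]
      rw [← keyN_succ basename i h1]
      have : m - i = (m - (i + 1)) + 1 := by omega
      rw [this, List.range'_succ]
      simp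
    · have : i = m := by omega
      subst this
      have hc := hm
      rw [keyN_succ basename i h1] at hc
      unfold loopA
      rw [if_neg (by simp [hc])]
      simp

lemma takeRun_run (d : List (String × String)) (basename : String) (m : Nat)
    (hm : (PySem.Dict.mk d).contains (keyN basename m) = false)
    (hlt : ∀ i < m, (PySem.Dict.mk d).contains (keyN basename i) = true) :
    ∀ (S : List (Int × String)) (p : Nat), p ≤ m →
      S.Pairwise (fun a b => a.1 < b.1) →
      (∀ x ∈ S, ∃ i : Nat, x.1 = (i : Int) ∧ p ≤ i) →
      (∀ i : Nat, p ≤ i → (((i : Int) ∈ S.map Prod.fst) ↔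
        (PySem.Dict.mk d).contains (keyN basename i) = true)) →
      (∀ (i : Nat) (v : String), ((i : Int), v) ∈ S →
        v = (PySem.Dict.mk d).getD (keyN basename i) "") →
      takeRun p S
        = (List.range' p (m - p)).map (fun j => (PySem.Dict.mk d).getD (keyN basename j) "") := by
  intro S
  induction S with
  | nil =>
    intro p hp _ _ hmem _
    have : m = p := by
      by_contra hne
      have hplt : p < m := by omega
      have := (hmem p le_rfl).mpr (hlt p hplt)
      simp at this
    rw [this]
    simp [takeRun]
  | cons x T ih =>
    intro p hp hpw hnn hmem hval
    obtain ⟨i₀, hi₀, hpi₀⟩ := hnn x (by simp)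
    have hPi₀ : (PySem.Dict.mk d).contains (keyN basename i₀) = true := by
      apply (hmem i₀ hpi₀).mp
      simp [← hi₀]
    rcases Nat.eq_or_lt_of_le hp with rfl | hplt
    · -- p = m : head index cannot be p, loop stops
      have hne : i₀ ≠ p := by
        intro he
        rw [he] at hPi₀
        rw [hPi₀] at hm
        exact absurd hm (by simp)
      obtain ⟨iv, vv⟩ := x
      simp only at hi₀
      rw [takeRun, hi₀, if_neg (by simpa using (by exact_mod_cast hne : (i₀ : Int) ≠ (p : Int)))]
      simp
    · -- p < m : head index is exactly p
      have hpP : (PySem.Dict.mk d).contains (keyN basename p) = true := hlt p hplt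
      have hpmem := (hmem p le_rfl).mpr hpP
      have hi₀p : i₀ = p := by
        rcases List.mem_map.mp hpmem with ⟨y, hy, hyf⟩
        rcases List.mem_cons.mp hy with rfl | hyT
        · have : (i₀ : Int) = (p : Int) := by rw [← hi₀, hyf]
          exact_mod_cast this
        · -- p is in the tail: contradicts sortedness unless i₀ ≤ p
          have := (List.pairwise_cons.mp hpw).1 y hyT
          rw [hyf, hi₀] at this
          have : (i₀ : Int) < (p : Int) := this
          have : i₀ < p := by exact_mod_cast this
          omega
      obtain ⟨iv, vv⟩ := x
      simp only at hi₀
      rw [takeRun, hi₀, hi₀p, if_pos (by simp)]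
      have hv : vv = (PySem.Dict.mk d).getD (keyN basename p) "" := by
        apply hval p vv
        rw [← hi₀p, ← hi₀]
        simp
      have hT := ih (p + 1) (by omega) (List.pairwise_cons.mp hpw).2
        (by
          intro y hy
          obtain ⟨i, hi, hpi⟩ := hnn y (by simp [hy])
          refine ⟨i, hi, ?_⟩
          have := (List.pairwise_cons.mp hpw).1 y hy
          simp only [hi₀, hi₀p, hi] at this
          have : p < i := by exact_mod_cast this
          omega)
        (by
          intro i hi
          constructor
          · intro hmemT
            exact (hmem i (by omega)).mp (by simp [hmemT])
          · intro hP
            have := (hmem i (by omega)).mpr hP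
            rcases List.mem_cons.mp (List.mem_map.mp this).choose_spec.1 with h1 | h1
            · exfalso
              have hyf := (List.mem_map.mp this).choose_spec.2
              rw [h1] at hyf
              simp only [hi₀, hi₀p] at hyf
              have : p = i := by exact_mod_cast hyf
              omega
            · exact List.mem_map.mpr ⟨_, h1, (List.mem_map.mp this).choose_spec.2⟩)
        (fun i v hv' => hval i v (by simp [hv']))
      rw [hT, hv]
      have : m - p = (m - (p + 1)) + 1 := by omega
      rw [this, List.range'_succ]
      simp

lemma keyN_zero (basename : String) : keyN basename 0 = basename := by rw [keyN, if_pos rfl]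

theorem main_eq (d : List (String × String)) (basename : String)
    (hnd : (d.map Prod.fst).Nodup) :
    getNumberedArgs d basename = getNumberedArgs_alt d basename := by
  classical
  have hkeys : (PySem.Dict.mk d).keys.Nodup := by simpa [PySem.Dict.keys] using hnd
  -- the first absent numbered key
  have hex : ∃ n, (PySem.Dict.mk d).contains (keyN basename n) = false := by
    by_contra hall
    rw [not_exists] at hall
    simp only [Bool.not_eq_false] at hall
    have := le_length_of_all_present d basename (d.length + 1) (fun i _ => hall i)
    omega
  set m := Nat.find hex with hmdef
  have hm : (PySem.Dict.mk d).contains (keyN basename m) = false := Nat.find_spec hex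
  have hlt : ∀ i < m, (PySem.Dict.mk d).contains (keyN basename i) = true := by
    intro i hi
    cases h : (PySem.Dict.mk d).contains (keyN basename i)
    · exact absurd h (by have := Nat.find_min hex hi; simpa [hmdef] using this)
    · rfl
  have hmlen : m ≤ d.length := le_length_of_all_present d basename m hlt
  -- A computes the run
  have hA : getNumberedArgs d basename
      = (List.range' 0 m).map (fun j => (PySem.Dict.mk d).getD (keyN basename j) "") := by
    show (if (PySem.Dict.mk d).contains basename then
        (PySem.Dict.mk d).getD basename "" :: loopA (PySem.Dict.mk d) basename d.length 1
      else []) = _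
    rcases Nat.eq_zero_or_pos m with hm0 | hmpos
    · rw [if_neg (by rw [← keyN_zero basename]; rw [hm0] at hm; simp [hm])]
      rw [hm0]
      simp
    · rw [if_pos (by rw [← keyN_zero basename]; exact hlt 0 hmpos)]
      rw [loopA_run d basename m hm hlt d.length 1 le_rfl hmpos (by omega)]
      have : m = (m - 1) + 1 := by omega
      rw [this, List.range'_succ]
      simp [keyN_zero]
  -- B computes the same run
  set S := PySem.List.sorted (collectIndexed d basename) (fun t => t.1) false with hS
  have hperm : S.Perm (collectIndexed d basename) := PySem.List.sorted_perm _ _ _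
  have hSmem : ∀ (j : Int) (v : String), (j, v) ∈ S ↔
      ∃ i : Nat, j = (i : Int) ∧ (keyN basename i, v) ∈ d := by
    intro j v
    rw [hperm.mem_iff]
    exact mem_collect d basename j v
  have hget : ∀ (i : Nat) (v : String),
      ((keyN basename i, v) ∈ d ↔ (PySem.Dict.mk d).get? (keyN basename i) = some v) := by
    intro i v
    rw [PySem.Dict.get?_eq_some_iff_mem_items _ _ _ hkeys]
  have hndS : (S.map Prod.fst).Nodup :=
    ((hperm.map Prod.fst).nodup_iff).mpr (nodup_collect_fst d basename hnd)
  have hpwle : S.Pairwise (fun a b => a.1 ≤ b.1) := PySem.List.sorted_pairwise _ _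
  have hpwne : S.Pairwise (fun a b => a.1 ≠ b.1) := List.pairwise_map.mp hndS
  have hpwlt : S.Pairwise (fun a b => a.1 < b.1) :=
    (hpwle.and hpwne).imp (fun h => lt_of_le_of_ne h.1 h.2)
  have hB := takeRun_run d basename m hm hlt S 0 (by omega) hpwlt
    (by
      intro x hx
      obtain ⟨i, hi, _⟩ := (hSmem x.1 x.2).mp (by simpa using hx)
      exact ⟨i, hi, by omega⟩)
    (by
      intro i _
      rw [PySem.Dict.contains_eq_isSome_get?]
      constructor
      · intro hmem
        obtain ⟨y, hy, hyf⟩ := List.mem_map.mp hmem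
        obtain ⟨i', hi', hmem'⟩ := (hSmem y.1 y.2).mp (by simpa using hy)
        have : i' = i := by
          have : ((i' : Nat) : Int) = (i : Int) := by rw [← hi', hyf]
          exact_mod_cast this
        rw [← this]
        rw [(hget i' y.2).mp hmem']
        rfl
      · intro hsome
        obtain ⟨v, hv⟩ := Option.isSome_iff_exists.mp hsome
        exact List.mem_map.mpr ⟨((i : Int), v), (hSmem _ _).mpr ⟨i, rfl, (hget i v).mpr hv⟩, rfl⟩)
    (by
      intro i v hv
      obtain ⟨i', hi', hmem'⟩ := (hSmem _ _).mp hv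
      have : i' = i := by exact_mod_cast hi'.symm
      subst this
      rw [PySem.Dict.getD, (hget i' v).mp hmem']
      rfl)
  show getNumberedArgs d basename = takeRun 0 S
  rw [hB, hA]
  simp

-- ===== VERDICT (by name: the statement is the Claim_ definition above) =====
theorem getNumberedArgs_spec : Claim_equal_getNumberedArgs := by
  intro d basename _ hnd
  unfold Spec_getNumberedArgs
  exact main_eq d basename hnd
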